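-- pv_equiv track=rewrite | github.com/ssunnykku/codingtest-study | sun_hee/22.12.28~29/문제3_부족한 금액 계산하기.py | solution
-- ===== SOURCE A (Python) =====
-- def solution(price, money, count):
--     sum = 0
--
--     for i in range(count):
--         sum += (i+1)*price
--
--     if sum <= money:
--         result = 0
--     elif sum > money:
--         result = sum-money
--
--     return result
-- ===== SOURCE B (Python) =====
-- def solution(price, money, count):
--     n = count if count > 0 else 0
--     total = price * (n * (n + 1) // 2)
--     shortfall = total - money
--     return shortfall if shortfall > 0 else 0
-- ===== Notes on version B (the rewrite author's own statement) =====
-- stated objective: faster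
-- what changed: Replaced the O(count) loop summing (i+1)*price with the closed-form arithmetic series price*n*(n+1)//2 and a max-with-0 shortfall.
import Mathlib
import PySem

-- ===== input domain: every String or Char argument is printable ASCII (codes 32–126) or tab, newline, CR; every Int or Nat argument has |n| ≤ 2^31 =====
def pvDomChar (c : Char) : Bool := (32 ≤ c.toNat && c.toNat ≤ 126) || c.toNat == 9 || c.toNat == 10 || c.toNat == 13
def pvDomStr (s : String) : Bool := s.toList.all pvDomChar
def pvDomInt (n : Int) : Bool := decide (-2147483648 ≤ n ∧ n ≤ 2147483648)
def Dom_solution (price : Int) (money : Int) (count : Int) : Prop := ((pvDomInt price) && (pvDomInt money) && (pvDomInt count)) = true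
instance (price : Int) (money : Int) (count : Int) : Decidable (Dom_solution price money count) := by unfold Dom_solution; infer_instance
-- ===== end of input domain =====

-- B replaces A's O(count) summation loop by the closed-form arithmetic series price*n*(n+1)//2 (objective: faster, asymptotic).

-- ===== PORT A =====
def solution (price : Int) (money : Int) (count : Int) : Int :=
  let sum := (PySem.List.pyRange 0 count 1).foldl (fun s i => s + (i + 1) * price) 0
  if sum ≤ money then 0
  else if sum > money then sum - money
  else 0  -- unreachable: the two Python branches are exhaustive

-- ===== PORT B =====
def solution_alt (price : Int) (money : Int) (count : Int) : Int :=
  let n := if count > 0 then count else 0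
  let total := price * PySem.Int.floordiv (n * (n + 1)) 2
  let shortfall := total - money
  if shortfall > 0 then shortfall else 0

-- ===== PRECONDITION & SPEC =====
def Spec_solution (price : Int) (money : Int) (count : Int) (out : Int) : Prop := out = solution_alt price money count
instance (price : Int) (money : Int) (count : Int) (out : Int) : Decidable (Spec_solution price money count out) := by unfold Spec_solution; infer_instance

-- ===== CLAIM (what is proved, stated in full; the proofs are below) =====
def Claim_equal_solution : Prop := ∀ (price : Int) (money : Int) (count : Int), Dom_solution price money count → Spec_solution price money count (solution price money count)

-- ===== LEMMAS AND PROOFS =====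

-- The loop computes the arithmetic series: its sum is price * (n*(n+1)/2) for n = max(count,0).
theorem pv_sum_loop (price : Int) (m : Nat) :
    (PySem.List.pyRange 0 (m : Int) 1).foldl (fun s i => s + (i + 1) * price) 0
      = price * ((m : Int) * ((m : Int) + 1) / 2) := by
  induction m with
  | zero => simp [PySem.List.pyRange]
  | succ k ih =>
    have hcast : ((k + 1 : Nat) : Int) = (k : Int) + 1 := by push_cast; ring
    rw [hcast, PySem.List.pyRange_one_succ_right (by positivity), List.foldl_append, ih]
    simp only [List.foldl]
    have hk : (k : Int) * ((k : Int) + 1) / 2 * 2 = (k : Int) * ((k : Int) + 1) := by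
      apply Int.ediv_mul_cancel
      rcases Int.even_or_odd (k : Int) with ⟨t, ht⟩ | ⟨t, ht⟩
      · exact ⟨t * ((k : Int) + 1), by rw [ht]; ring⟩
      · exact ⟨(k : Int) * (t + 1), by rw [ht]; ring⟩
    have hk1 : ((k : Int) + 1) * (((k : Int) + 1) + 1) / 2 * 2 = ((k : Int) + 1) * (((k : Int) + 1) + 1) := by
      apply Int.ediv_mul_cancel
      rcases Int.even_or_odd (k : Int) with ⟨t, ht⟩ | ⟨t, ht⟩
      · exact ⟨(t + 1) * ((k : Int) + 1), by rw [ht]; ring⟩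
      · exact ⟨(t + 1) * (((k : Int) + 1) + 1), by rw [ht]; ring⟩
    have hx : ((k : Int) + 1) * (((k : Int) + 1) + 1) = (k : Int) * ((k : Int) + 1) + 2 * ((k : Int) + 1) := by ring
    have hq : ((k : Int) + 1) * (((k : Int) + 1) + 1) / 2 = (k : Int) * ((k : Int) + 1) / 2 + ((k : Int) + 1) := by omega
    rw [hq]
    ring

theorem solution_spec : Claim_equal_solution := by
  intro price money count _
  unfold Spec_solution solution solution_alt
  by_cases hc : count > 0
  · have hm : count = ((count.toNat : Nat) : Int) := by omega
    simp only [hc, if_pos]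
    rw [hm, pv_sum_loop price count.toNat,
        PySem.Int.floordiv_eq_ediv_of_pos (by omega : (0:Int) < 2)]
    simp only [gt_iff_lt]
    split_ifs with h1 h2 h3 <;> omega
  · have h0 : count ≤ 0 := by omega
    have : PySem.List.pyRange 0 count 1 = [] := by
      have := PySem.List.length_pyRange_one 0 count
      cases hE : PySem.List.pyRange 0 count 1 with
      | nil => rfl
      | cons a l => rw [hE] at this; simp at this; omega
    rw [this]
    simp only [List.foldl_nil, if_neg hc]
    rw [PySem.Int.floordiv_eq_ediv_of_pos (by omega : (0:Int) < 2)]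
    norm_num
    omega
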